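-- pv_equiv track=rewrite | github.com/davidtey/fe5211_project | code/visualizations.py | _quarter_labels
-- ===== SOURCE A (Python) =====
-- def _quarter_labels(horizon_quarters: int) -> list[str]:
--     labels = []
--     year = 2026
--     quarter = 3
--     for _ in range(horizon_quarters):
--         labels.append(f"{year} Q{quarter}")
--         quarter += 1
--         if quarter > 4:
--             quarter = 1
--             year += 1
--     return labels
-- ===== SOURCE B (Python) =====
-- def _quarter_labels(horizon_quarters: int) -> list[str]:
--     return [
--         f"{2026 + (2 + i) // 4} Q{(2 + i) % 4 + 1}"
--         for i in range(horizon_quarters)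
--     ]
-- ===== Notes on version B (the rewrite author's own statement) =====
-- stated objective: simpler
-- what changed: Replaced the mutable year/quarter accumulator with a carry branch by a list comprehension computing each label in closed form via divmod arithmetic on the index.
import Mathlib
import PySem

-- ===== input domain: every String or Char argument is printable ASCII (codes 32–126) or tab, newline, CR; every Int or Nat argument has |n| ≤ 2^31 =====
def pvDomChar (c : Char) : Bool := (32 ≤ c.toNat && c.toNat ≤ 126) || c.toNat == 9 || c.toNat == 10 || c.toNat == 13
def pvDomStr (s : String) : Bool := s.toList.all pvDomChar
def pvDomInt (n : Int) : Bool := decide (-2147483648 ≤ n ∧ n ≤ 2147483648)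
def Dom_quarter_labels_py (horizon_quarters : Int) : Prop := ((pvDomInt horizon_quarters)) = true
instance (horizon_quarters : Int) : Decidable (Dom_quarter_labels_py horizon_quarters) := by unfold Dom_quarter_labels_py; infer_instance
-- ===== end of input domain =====

-- B replaces A's mutable year/quarter state and carry branch by a closed-form
-- divmod computation per index (objective: simpler).

-- ===== PORT A =====
-- loop state: (year, quarter, labels); one step per loop iteration of range(horizon_quarters)
def qA_go : Nat → Int → Int → List String → List String
  | 0, _, _, labels => labels
  | n + 1, year, quarter, labels =>
    let labels' := labels ++ [PySem.Int.toStr year ++ " Q" ++ PySem.Int.toStr quarter]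
    let quarter' := quarter + 1
    if quarter' > 4 then qA_go n (year + 1) 1 labels'
    else qA_go n year quarter' labels'

def quarter_labels_py (horizon_quarters : Int) : List String :=
  qA_go horizon_quarters.toNat 2026 3 []

-- ===== PORT B =====
def quarter_labels_py_alt (horizon_quarters : Int) : List String :=
  (PySem.List.pyRange 0 horizon_quarters 1).map (fun i =>
    PySem.Int.toStr (2026 + PySem.Int.floordiv (2 + i) 4) ++ " Q" ++
      PySem.Int.toStr (PySem.Int.mod (2 + i) 4 + 1))

-- ===== PRECONDITION & SPEC =====
def Spec_quarter_labels_py (horizon_quarters : Int) (out : List String) : Prop := out = quarter_labels_py_alt horizon_quarters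
instance (horizon_quarters : Int) (out : List String) : Decidable (Spec_quarter_labels_py horizon_quarters out) := by unfold Spec_quarter_labels_py; infer_instance

-- ===== CLAIM (what is proved, stated in full; the proofs are below) =====
def Claim_equal_quarter_labels_py : Prop := ∀ (horizon_quarters : Int), Dom_quarter_labels_py horizon_quarters → Spec_quarter_labels_py horizon_quarters (quarter_labels_py horizon_quarters)

-- ===== LEMMAS AND PROOFS =====

-- B's label at (integer) index i, as a function of a Nat index
def qB_lab (i : Nat) : String :=
  PySem.Int.toStr (2026 + PySem.Int.floordiv (2 + (i : Int)) 4) ++ " Q" ++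
    PySem.Int.toStr (PySem.Int.mod (2 + (i : Int)) 4 + 1)

lemma qB_lab_eq (i : Nat) :
    qB_lab i = PySem.Int.toStr (2026 + (((2 + i) / 4 : Nat) : Int)) ++ " Q" ++
      PySem.Int.toStr ((((2 + i) % 4 : Nat) : Int) + 1) := by
  unfold qB_lab
  have h1 : (2 + (i : Int)) = ((2 + i : Nat) : Int) := by push_cast; ring
  have h2 : (4 : Int) = ((4 : Nat) : Int) := by norm_num
  rw [h1, h2, PySem.Int.floordiv_natCast, PySem.Int.mod_natCast]

lemma qA_go_main (n : Nat) : ∀ (i : Nat) (labels : List String),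
    qA_go n (2026 + (((2 + i) / 4 : Nat) : Int)) ((((2 + i) % 4 : Nat) : Int) + 1) labels
      = labels ++ (List.range n).map (fun k => qB_lab (i + k)) := by
  induction n with
  | zero => intro i labels; simp [qA_go]
  | succ n ih =>
    intro i labels
    rw [qA_go]
    have hlab : PySem.Int.toStr (2026 + (((2 + i) / 4 : Nat) : Int)) ++ " Q" ++
        PySem.Int.toStr ((((2 + i) % 4 : Nat) : Int) + 1) = qB_lab i := (qB_lab_eq i).symm
    have hrange : (List.range (n + 1)).map (fun k => qB_lab (i + k))
        = qB_lab i :: (List.range n).map (fun k => qB_lab (i + 1 + k)) := by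
      rw [List.range_succ_eq_map]
      simp only [List.map_cons, List.map_map, Nat.add_zero]
      have hf : ((fun k => qB_lab (i + k)) ∘ Nat.succ) = (fun k => qB_lab (i + 1 + k)) := by
        funext k
        simp only [Function.comp_apply]
        have : i + k.succ = i + 1 + k := by omega
        rw [this]
      rw [hf]
    rw [hlab]
    by_cases hq : (2 + i) % 4 = 3
    · have hcond : ((((2 + i) % 4 : Nat) : Int) + 1) + 1 > 4 := by rw [hq]; norm_num
      rw [if_pos hcond]
      have hy : 2026 + (((2 + i) / 4 : Nat) : Int) + 1 = 2026 + (((2 + (i + 1)) / 4 : Nat) : Int) := by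
        have : (2 + (i + 1)) / 4 = (2 + i) / 4 + 1 := by omega
        rw [this]; push_cast; ring
      have hq' : (1 : Int) = (((2 + (i + 1)) % 4 : Nat) : Int) + 1 := by
        have : (2 + (i + 1)) % 4 = 0 := by omega
        rw [this]; norm_num
      have step := ih (i + 1) (labels ++ [qB_lab i])
      rw [← hy, ← hq'] at step
      rw [step, hrange]
      simp
    · have hcond : ¬ (((((2 + i) % 4 : Nat) : Int) + 1) + 1 > 4) := by
        have : (2 + i) % 4 < 3 := by omega
        push_cast
        omega
      rw [if_neg hcond]
      have hqc : (((2 + i) % 4 : Nat) : Int) + 1 + 1 = (((2 + (i + 1)) % 4 : Nat) : Int) + 1 := by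
        have : (2 + (i + 1)) % 4 = (2 + i) % 4 + 1 := by omega
        rw [this]; push_cast; ring
      have hyc : (2026 + (((2 + i) / 4 : Nat) : Int)) = 2026 + (((2 + (i + 1)) / 4 : Nat) : Int) := by
        have : (2 + (i + 1)) / 4 = (2 + i) / 4 := by omega
        rw [this]
      have step := ih (i + 1) (labels ++ [qB_lab i])
      rw [← hqc, ← hyc] at step
      rw [step, hrange]
      simp

-- ===== VERDICT (by name: the statement is the Claim_ definition above) =====
theorem quarter_labels_py_spec : Claim_equal_quarter_labels_py := by
  intro h _
  unfold Spec_quarter_labels_py quarter_labels_py quarter_labels_py_alt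
  have main := qA_go_main h.toNat 0 []
  norm_num at main
  rw [main]
  rw [PySem.List.pyRange_one]
  simp only [List.map_map, Int.sub_zero]
  have hf : (fun k : Nat => qB_lab k)
      = ((fun i : Int => PySem.Int.toStr (2026 + PySem.Int.floordiv (2 + i) 4) ++ " Q" ++
          PySem.Int.toStr (PySem.Int.mod (2 + i) 4 + 1)) ∘ fun k : Nat => (0 : Int) + k) := by
    funext k
    simp [Function.comp, qB_lab]
  rw [hf]
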